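-- pv_equiv track=rewrite | github.com/magiccodingman/Magic-AI-Wiki | Scripts/Dell-Server-Fan-Control.py | determine_fan_speed
-- ===== SOURCE A (Python) =====
-- def determine_fan_speed(gpu_temps, cpu_temps):
--     temps = gpu_temps + cpu_temps
--     fan_speed = 20  # Default fan speed
--     if any(temp > 75 for temp in temps):
--         fan_speed = 100
--     elif any(temp > 73 for temp in temps):
--         fan_speed = 90
--     elif any(temp > 70 for temp in temps):
--         fan_speed = 80
--     elif any(temp > 67 for temp in temps):
--         fan_speed = 75
--     elif any(temp > 65 for temp in temps):
--         fan_speed = 70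
--     elif any(temp > 63 for temp in temps):
--         fan_speed = 65
--     elif any(temp > 60 for temp in temps):
--         fan_speed = 60
--     elif any(temp > 57 for temp in temps):
--         fan_speed = 55
--     elif any(temp > 55 for temp in temps):
--         fan_speed = 50
--     elif any(temp > 53 for temp in temps):
--         fan_speed = 45
--     elif any(temp > 50 for temp in temps):
--         fan_speed = 40
--     elif any(temp > 45 for temp in temps):
--         fan_speed = 35
--     elif any(temp > 40 for temp in temps):
--         fan_speed = 30
--     return fan_speed
-- ===== SOURCE B (Python) =====
-- _FAN_TABLE = [(75, 100), (73, 90), (70, 80), (67, 75), (65, 70), (63, 65),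
--               (60, 60), (57, 55), (55, 50), (53, 45), (50, 40), (45, 35), (40, 30)]
--
-- def determine_fan_speed(gpu_temps, cpu_temps):
--     temps = gpu_temps + cpu_temps
--     if not temps:
--         return 20
--     m = max(temps)
--     for limit, speed in _FAN_TABLE:
--         if m > limit:
--             return speed
--     return 20
-- ===== Notes on version B (the rewrite author's own statement) =====
-- stated objective: simpler
-- what changed: Replaces the 13-branch chain of any() scans (each a full pass over the list) with a single max() pass followed by a lookup in an ordered (limit, speed) table.
import Mathlib
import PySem

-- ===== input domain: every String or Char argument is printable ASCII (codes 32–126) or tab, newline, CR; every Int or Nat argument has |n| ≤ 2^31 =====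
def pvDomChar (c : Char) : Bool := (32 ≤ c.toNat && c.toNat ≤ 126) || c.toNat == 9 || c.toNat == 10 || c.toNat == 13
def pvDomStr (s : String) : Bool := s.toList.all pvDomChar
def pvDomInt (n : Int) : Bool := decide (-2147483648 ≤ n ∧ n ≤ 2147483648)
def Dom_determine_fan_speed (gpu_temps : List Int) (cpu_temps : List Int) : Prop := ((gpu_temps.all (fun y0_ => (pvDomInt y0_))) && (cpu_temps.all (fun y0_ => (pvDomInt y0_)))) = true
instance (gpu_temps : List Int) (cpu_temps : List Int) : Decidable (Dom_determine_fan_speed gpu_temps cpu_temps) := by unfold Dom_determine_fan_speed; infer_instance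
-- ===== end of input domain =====

-- B replaces A's 13 separate any() scans by one max() pass and an ordered (limit, speed) table lookup (simpler).


-- ===== PORT A =====
-- literal transliteration of A: a chain of any(temp > c) scans over the concatenated list
def determine_fan_speed (gpu_temps : List Int) (cpu_temps : List Int) : Int :=
  let temps := gpu_temps ++ cpu_temps
  if temps.any (fun temp => decide (temp > 75)) then 100
  else if temps.any (fun temp => decide (temp > 73)) then 90
  else if temps.any (fun temp => decide (temp > 70)) then 80
  else if temps.any (fun temp => decide (temp > 67)) then 75
  else if temps.any (fun temp => decide (temp > 65)) then 70
  else if temps.any (fun temp => decide (temp > 63)) then 65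
  else if temps.any (fun temp => decide (temp > 60)) then 60
  else if temps.any (fun temp => decide (temp > 57)) then 55
  else if temps.any (fun temp => decide (temp > 55)) then 50
  else if temps.any (fun temp => decide (temp > 53)) then 45
  else if temps.any (fun temp => decide (temp > 50)) then 40
  else if temps.any (fun temp => decide (temp > 45)) then 35
  else if temps.any (fun temp => decide (temp > 40)) then 30
  else 20

-- ===== PORT B =====
-- the ordered (limit, speed) table of Source B
def fanTable : List (Int × Int) :=
  [(75, 100), (73, 90), (70, 80), (67, 75), (65, 70), (63, 65),
   (60, 60), (57, 55), (55, 50), (53, 45), (50, 40), (45, 35), (40, 30)]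

-- the 'for limit, speed in _FAN_TABLE: if m > limit: return speed' loop
def fanLookup (m : Int) : List (Int × Int) → Int
  | [] => 20
  | (limit, speed) :: rest => if m > limit then speed else fanLookup m rest

-- literal transliteration of B: one max pass, then the table lookup
def determine_fan_speed_alt (gpu_temps : List Int) (cpu_temps : List Int) : Int :=
  match gpu_temps ++ cpu_temps with
  | [] => 20
  | t :: ts => fanLookup (ts.foldl max t) fanTable

-- ===== PRECONDITION & SPEC =====
def Spec_determine_fan_speed (gpu_temps : List Int) (cpu_temps : List Int) (out : Int) : Prop := out = determine_fan_speed_alt gpu_temps cpu_temps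
instance (gpu_temps : List Int) (cpu_temps : List Int) (out : Int) : Decidable (Spec_determine_fan_speed gpu_temps cpu_temps out) := by unfold Spec_determine_fan_speed; infer_instance

-- ===== CLAIM (what is proved, stated in full; the proofs are below) =====
def Claim_equal_determine_fan_speed : Prop := ∀ (gpu_temps : List Int) (cpu_temps : List Int), Dom_determine_fan_speed gpu_temps cpu_temps → Spec_determine_fan_speed gpu_temps cpu_temps (determine_fan_speed gpu_temps cpu_temps)

-- ===== LEMMAS AND PROOFS =====
-- any (· > c) = true on a nonempty list is exactly 'max of the list > c'
theorem any_gt_iff_max (t : Int) (ts : List Int) (c : Int) :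
    ((t :: ts).any (fun x => decide (x > c)) = true) ↔ ts.foldl max t > c := by
  induction ts generalizing t with
  | nil => simp
  | cons u us ih =>
    rw [List.foldl_cons, ← ih (max t u)]
    simp only [List.any_cons, List.any_eq_true, Bool.or_eq_true, decide_eq_true_eq,
      lt_max_iff]
    tauto

-- ===== VERDICT (by name: the statement is the Claim_ definition above) =====
theorem determine_fan_speed_spec : Claim_equal_determine_fan_speed := by
  intro gpu cpu _
  unfold Spec_determine_fan_speed determine_fan_speed determine_fan_speed_alt
  cases h : gpu ++ cpu with
  | nil => simp
  | cons t ts =>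
    simp only [any_gt_iff_max, fanTable, fanLookup]
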